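-- pv_equiv track=rewrite | github.com/eumyang99/TIL | Algorithm/SWEA/14177/14177.py | runnn
-- ===== SOURCE A (Python) =====
-- def runnn(hand):
--     hand_set = set(hand)                            # set으로 중복 제거
--     hand_set = list(hand_set)                       # 리스트로 바꾸고
--     hand_set.sort()                                 # 정렬
--
--     cnt = 0
--     for i in range(len(hand_set)-1):            # 전체 순회를 돌면서
--         if hand_set[i] + 1 == hand_set[i+1]:        # 바로 뒤에 녀석과 비교해서 +1 차이나면
--             cnt += 1                                    # cnt +1
--             if cnt == 2:                                    # cnt가 2이면 연달아 3개가 있는 것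
--                 return True                                 # True 반환
--         else:                                       # 1보다 큰 차이가 나면
--             cnt = 0                                     # cnt는 0으로 초기화
--     else:                                       # 순회가 다 끝나면
--         return False                            # run이 없으니 False반환
-- ===== SOURCE B (Python) =====
-- def runnn(hand):
--     s = set(hand)
--     for v in s:
--         if v - 1 not in s:            # v is the smallest element of its run
--             cur = v
--             length = 1
--             while cur + 1 in s:       # grow the run upward
--                 cur += 1
--                 length += 1
--                 if length == 3:
--                     return True
--     return False
-- ===== Notes on version B (the rewrite author's own statement) =====
-- stated objective: alternative
-- what changed: Replaces A's sort-then-adjacent-pair counter scan with the classic set-based consecutive-run traversal: build a set, and only from each run start (v-1 not in the set) grow the run with membership tests until length 3.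
import Mathlib
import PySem

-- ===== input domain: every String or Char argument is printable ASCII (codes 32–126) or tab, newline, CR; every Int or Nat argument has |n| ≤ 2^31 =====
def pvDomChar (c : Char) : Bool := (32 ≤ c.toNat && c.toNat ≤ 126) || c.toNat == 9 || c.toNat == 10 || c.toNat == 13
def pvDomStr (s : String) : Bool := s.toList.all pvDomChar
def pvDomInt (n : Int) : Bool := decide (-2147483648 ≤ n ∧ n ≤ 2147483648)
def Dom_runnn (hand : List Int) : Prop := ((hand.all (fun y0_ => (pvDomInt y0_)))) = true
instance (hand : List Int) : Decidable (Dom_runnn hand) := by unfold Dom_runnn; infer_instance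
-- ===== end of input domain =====

-- B replaces A's sort + adjacent-pair counter scan with the set-based run traversal
-- that grows a run only from its smallest element; same return value, no speed claim.

-- ===== PORT A =====
-- the 'for i in range(len(hand_set)-1)' scan comparing hand_set[i]+1 with hand_set[i+1],
-- carrying cnt, transcribed as the obvious recursion over adjacent pairs of the same list
def pvScanA : List Int → Int → Bool
  | a :: b :: rest, cnt =>
      if a + 1 = b then
        (if cnt + 1 = 2 then true else pvScanA (b :: rest) (cnt + 1))
      else pvScanA (b :: rest) 0
  | _, _ => false

def runnn (hand : List Int) : Bool :=
  pvScanA (PySem.List.sorted (PySem.Set.ofList hand) (fun x => x) false) 0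

-- ===== PORT B =====
-- the inner 'while cur + 1 in s' of Source B; it returns as soon as length reaches 3, so it
-- runs at most twice and fuel 3 is enough on every input (fuel only makes it total)
def pvExtend : Nat → PySem.Set Int → Int → Int → Bool
  | 0, _, _, _ => false
  | f + 1, s, cur, length =>
      if PySem.Set.contains s (cur + 1) then
        (if length + 1 = 3 then true else pvExtend f s (cur + 1) (length + 1))
      else false

def runnn_alt (hand : List Int) : Bool :=
  let s := PySem.Set.ofList hand
  s.any (fun v => if PySem.Set.contains s (v - 1) then false else pvExtend 3 s v 1)

-- ===== PRECONDITION & SPEC =====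
def Spec_runnn (hand : List Int) (out : Bool) : Prop := out = runnn_alt hand
instance (hand : List Int) (out : Bool) : Decidable (Spec_runnn hand out) := by unfold Spec_runnn; infer_instance

-- ===== CLAIM (what is proved, stated in full; the proofs are below) =====
def Claim_equal_runnn : Prop := ∀ (hand : List Int), Dom_runnn hand → Spec_runnn hand (runnn hand)

-- ===== LEMMAS AND PROOFS =====

-- two adjacent +1 steps somewhere in the list (what A's counter scan detects)
def twoAdj : List Int → Bool
  | a :: b :: c :: rest => (a + 1 = b ∧ b + 1 = c : Bool) || twoAdj (b :: c :: rest)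
  | _ => false

def pairHead : List Int → Bool
  | a :: b :: _ => a + 1 = b
  | _ => false

lemma pvScanA_char : ∀ xs : List Int,
    pvScanA xs 0 = twoAdj xs ∧ pvScanA xs 1 = (pairHead xs || twoAdj xs) := by
  intro xs
  induction xs with
  | nil => simp [pvScanA, twoAdj, pairHead]
  | cons b r ih =>
    match r with
    | [] => simp [pvScanA, twoAdj, pairHead]
    | c :: r' =>
      obtain ⟨ih0, ih1⟩ := ih
      constructor
      · show pvScanA (b :: c :: r') 0 = twoAdj (b :: c :: r')
        by_cases h : b + 1 = c
        · simp only [pvScanA, h, if_pos]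
          match r' with
          | [] => simp [pvScanA, twoAdj]
          | d :: r'' =>
            simp only [twoAdj, h]
            rw [show (0 : Int) + 1 = 1 by norm_num, ih1]
            simp [pairHead]
        · simp only [pvScanA, if_neg h]
          rw [ih0]
          match r' with
          | [] => simp [twoAdj]
          | d :: r'' => simp [twoAdj, h]
      · show pvScanA (b :: c :: r') 1 = (pairHead (b :: c :: r') || twoAdj (b :: c :: r'))
        by_cases h : b + 1 = c
        · simp [pvScanA, h, pairHead]
        · simp only [pvScanA, if_neg h, ih0, pairHead]
          match r' with
          | [] => simp [twoAdj, h]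
          | d :: r'' => simp [twoAdj, h]

lemma twoAdj_mem : ∀ xs : List Int, twoAdj xs = true →
    ∃ v, v ∈ xs ∧ v + 1 ∈ xs ∧ v + 2 ∈ xs
  | a :: b :: c :: rest, h => by
      simp only [twoAdj, Bool.or_eq_true, decide_eq_true_eq] at h
      rcases h with ⟨h1, h2⟩ | h
      · refine ⟨a, by simp, ?_, ?_⟩
        · rw [h1]; simp
        · rw [show a + 2 = c by omega]; simp
      · obtain ⟨v, hv, hv1, hv2⟩ := twoAdj_mem (b :: c :: rest) h
        exact ⟨v, List.mem_cons_of_mem _ hv, List.mem_cons_of_mem _ hv1,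
          List.mem_cons_of_mem _ hv2⟩
  | [], h => by simp [twoAdj] at h
  | [a], h => by simp [twoAdj] at h
  | [a, b], h => by simp [twoAdj] at h

lemma mem_twoAdj : ∀ xs : List Int, xs.Pairwise (· < ·) →
    ∀ v : Int, v ∈ xs → v + 1 ∈ xs → v + 2 ∈ xs → twoAdj xs = true := by
  intro xs
  induction xs with
  | nil => simp
  | cons a t ih =>
    intro hp v hv hv1 hv2
    have hat : ∀ x ∈ t, a < x := fun x hx => (List.pairwise_cons.mp hp).1 x hx
    have hpt : t.Pairwise (· < ·) := (List.pairwise_cons.mp hp).2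
    rcases List.mem_cons.mp hv with rfl | hvt
    · -- v = a : the next two elements must be v+1 and v+2
      have h1t : v + 1 ∈ t := by
        rcases List.mem_cons.mp hv1 with h | h
        · omega
        · exact h
      match t, hat, hpt, h1t, hv2 with
      | b :: t', hat, hpt, h1t, hv2 =>
        have hb : v < b := hat b (by simp)
        have hbt' : ∀ x ∈ t', b < x := fun x hx => (List.pairwise_cons.mp hpt).1 x hx
        have hb1 : b = v + 1 := by
          rcases List.mem_cons.mp h1t with h | h
          · omega
          · have := hbt' _ h; omega
        have h2t' : v + 2 ∈ t' := by
          rcases List.mem_cons.mp hv2 with h | h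
          · omega
          · rcases List.mem_cons.mp h with h | h
            · omega
            · exact h
        match t', hbt', hpt, h2t' with
        | c :: t'', hbt', hpt, h2t' =>
          have hc : b < c := hbt' c (by simp)
          have hct'' : ∀ x ∈ t'', c < x := fun x hx =>
            ((List.pairwise_cons.mp (List.pairwise_cons.mp hpt).2).1) x hx
          have hc2 : c = v + 2 := by
            rcases List.mem_cons.mp h2t' with h | h
            · omega
            · have := hct'' _ h; omega
          simp only [twoAdj, Bool.or_eq_true, decide_eq_true_eq]
          exact Or.inl ⟨by omega, by omega⟩
    · -- v ∈ t : all three are in t, recurse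
      have hav : a < v := hat v hvt
      have h1t : v + 1 ∈ t := by
        rcases List.mem_cons.mp hv1 with h | h
        · omega
        · exact h
      have h2t : v + 2 ∈ t := by
        rcases List.mem_cons.mp hv2 with h | h
        · omega
        · exact h
      have htt := ih hpt v hvt h1t h2t
      match t, htt with
      | b :: c :: r, htt =>
        simp only [twoAdj, Bool.or_eq_true]
        exact Or.inr htt

-- every triple v, v+1, v+2 of members yields one whose run start w has w-1 outside the list
lemma run_start : ∀ xs : List Int, xs.Pairwise (· < ·) →
    ∀ v : Int, v ∈ xs → v + 1 ∈ xs → v + 2 ∈ xs →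
    ∃ w : Int, w - 1 ∉ xs ∧ w ∈ xs ∧ w + 1 ∈ xs ∧ w + 2 ∈ xs := by
  intro xs
  induction xs with
  | nil => simp
  | cons a t ih =>
    intro hp v hv hv1 hv2
    have hat : ∀ x ∈ t, a < x := fun x hx => (List.pairwise_cons.mp hp).1 x hx
    have hpt : t.Pairwise (· < ·) := (List.pairwise_cons.mp hp).2
    have hamin : a - 1 ∉ (a :: t) := by
      intro h
      rcases List.mem_cons.mp h with h | h
      · omega
      · have := hat _ h; omega
    rcases List.mem_cons.mp hv with rfl | hvt
    · exact ⟨v, hamin, hv, hv1, hv2⟩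
    · have hav : a < v := hat v hvt
      have h1t : v + 1 ∈ t := by
        rcases List.mem_cons.mp hv1 with h | h
        · omega
        · exact h
      have h2t : v + 2 ∈ t := by
        rcases List.mem_cons.mp hv2 with h | h
        · omega
        · exact h
      obtain ⟨w, hw0, hw, hw1, hw2⟩ := ih hpt v hvt h1t h2t
      by_cases hwa : w - 1 = a
      · refine ⟨a, hamin, by simp, ?_, ?_⟩
        · rw [show a + 1 = w by omega]
          exact List.mem_cons_of_mem _ hw
        · rw [show a + 2 = w + 1 by omega]
          exact List.mem_cons_of_mem _ hw1
      · refine ⟨w, ?_, List.mem_cons_of_mem _ hw, List.mem_cons_of_mem _ hw1,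
          List.mem_cons_of_mem _ hw2⟩
        intro h
        rcases List.mem_cons.mp h with h | h
        · exact hwa h
        · exact hw0 h

lemma contains_iff (s : PySem.Set Int) (x : Int) :
    PySem.Set.contains s x = true ↔ x ∈ s := by
  simp [PySem.Set.contains]

lemma pvExtend3 (s : PySem.Set Int) (v : Int) :
    pvExtend 3 s v 1 = (PySem.Set.contains s (v + 1) && PySem.Set.contains s (v + 2)) := by
  cases hc1 : PySem.Set.contains s (v + 1) with
  | false =>
    simp only [pvExtend, hc1]
    simp
  | true =>
    cases hc2 : PySem.Set.contains s (v + 2) with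
    | false =>
      simp only [pvExtend, hc1, show v + 1 + 1 = v + 2 by ring, hc2]
      simp
    | true =>
      simp only [pvExtend, hc1, show v + 1 + 1 = v + 2 by ring, hc2]
      simp

lemma alt_iff (hand : List Int) :
    runnn_alt hand = true ↔
      ∃ v : Int, v - 1 ∉ hand ∧ v ∈ hand ∧ v + 1 ∈ hand ∧ v + 2 ∈ hand := by
  unfold runnn_alt
  rw [List.any_eq_true]
  constructor
  · rintro ⟨v, hv, hb⟩
    cases hvm : PySem.Set.contains (PySem.Set.ofList hand) (v - 1) with
    | true =>
      rw [if_pos hvm] at hb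
      cases hb
    | false =>
      rw [if_neg (fun h => by rw [hvm] at h; cases h), pvExtend3] at hb
      rw [Bool.and_eq_true, contains_iff, contains_iff,
        PySem.Set.mem_ofList, PySem.Set.mem_ofList] at hb
      refine ⟨v, ?_, (PySem.Set.mem_ofList hand v).mp hv, hb.1, hb.2⟩
      intro h
      have := (contains_iff _ _).mpr ((PySem.Set.mem_ofList hand _).mpr h)
      rw [hvm] at this
      cases this
  · rintro ⟨v, h0, hv, h1, h2⟩
    refine ⟨v, (PySem.Set.mem_ofList hand v).mpr hv, ?_⟩
    rw [if_neg (fun h => h0 ((PySem.Set.mem_ofList hand _).mp ((contains_iff _ _).mp h))),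
      pvExtend3, Bool.and_eq_true, contains_iff, contains_iff,
      PySem.Set.mem_ofList, PySem.Set.mem_ofList]
    exact ⟨h1, h2⟩

lemma a_iff (hand : List Int) :
    runnn hand = true ↔ ∃ v : Int, v ∈ hand ∧ v + 1 ∈ hand ∧ v + 2 ∈ hand := by
  unfold runnn
  set xs := PySem.List.sorted (PySem.Set.ofList hand) (fun x => x) false with hxs
  have hmem : ∀ x : Int, x ∈ xs ↔ x ∈ hand := by
    intro x
    rw [hxs, PySem.List.mem_sorted, PySem.Set.mem_ofList]
  have hsorted : xs.Pairwise (· < ·) := PySem.List.sorted_ofList_pairwise_lt hand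
  rw [(pvScanA_char xs).1]
  constructor
  · intro h
    obtain ⟨v, hv, h1, h2⟩ := twoAdj_mem xs h
    exact ⟨v, (hmem v).mp hv, (hmem _).mp h1, (hmem _).mp h2⟩
  · rintro ⟨v, hv, h1, h2⟩
    exact mem_twoAdj xs hsorted v ((hmem v).mpr hv) ((hmem _).mpr h1) ((hmem _).mpr h2)

-- ===== VERDICT (by name: the statement is the Claim_ definition above) =====
theorem runnn_spec : Claim_equal_runnn := by
  intro hand _
  unfold Spec_runnn
  have hiff : runnn hand = true ↔ runnn_alt hand = true := by
    rw [a_iff, alt_iff]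
    constructor
    · rintro ⟨v, hv, h1, h2⟩
      set xs := PySem.List.sorted (PySem.Set.ofList hand) (fun x => x) false with hxs
      have hmem : ∀ x : Int, x ∈ xs ↔ x ∈ hand := by
        intro x
        rw [hxs, PySem.List.mem_sorted, PySem.Set.mem_ofList]
      obtain ⟨w, hw0, hw, hw1, hw2⟩ :=
        run_start xs (PySem.List.sorted_ofList_pairwise_lt hand) v
          ((hmem v).mpr hv) ((hmem _).mpr h1) ((hmem _).mpr h2)
      exact ⟨w, fun h => hw0 ((hmem _).mpr h), (hmem _).mp hw, (hmem _).mp hw1,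
        (hmem _).mp hw2⟩
    · rintro ⟨v, _, hv, h1, h2⟩
      exact ⟨v, hv, h1, h2⟩
  cases hA : runnn hand <;> cases hB : runnn_alt hand <;> simp_all
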